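-- pv_equiv track=rewrite | github.com/FrazierMark/code_wars_kata_a_day | number_to_digit_tiers.py | create_array_of_tiers
-- ===== SOURCE A (Python) =====
-- def create_array_of_tiers(n):
-- 	tiers = []
-- 	num_string = str(n)
-- 	tiers.append(num_string)
--
-- 	while num_string:
-- 		num_string = num_string[:-1]
-- 		if num_string:
-- 			tiers.append(num_string)
-- 	tiers.reverse()
-- 	return tiers
-- ===== SOURCE B (Python) =====
-- def create_array_of_tiers(n):
--     s = str(n)
--     return [s[:i] for i in range(1, len(s) + 1)]
-- ===== Notes on version B (the rewrite author's own statement) =====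
-- stated objective: simpler
-- what changed: B builds each prefix directly by its target length in ascending order via slices over range(1, len+1), eliminating A's destructive strip-from-the-end while-loop, the non-empty checks and the final reverse.
import Mathlib
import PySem

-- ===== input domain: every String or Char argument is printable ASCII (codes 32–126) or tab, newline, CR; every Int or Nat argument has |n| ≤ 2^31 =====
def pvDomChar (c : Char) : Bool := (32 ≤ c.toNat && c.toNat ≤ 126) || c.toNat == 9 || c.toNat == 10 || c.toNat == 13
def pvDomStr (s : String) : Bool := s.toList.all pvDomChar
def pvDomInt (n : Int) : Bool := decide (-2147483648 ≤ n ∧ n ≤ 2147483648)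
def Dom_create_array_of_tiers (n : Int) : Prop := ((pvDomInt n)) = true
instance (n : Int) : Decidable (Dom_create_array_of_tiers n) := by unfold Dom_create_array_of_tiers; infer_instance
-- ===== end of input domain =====

-- B builds the prefixes ascending by slice length; A strips characters off the end and reverses at the close. (objective: simpler)

-- ===== PORT A =====
-- the while-loop: num_string[:-1] is dropLast on the character list; append only when non-empty
def pvALoop (cs : List Char) (tiers : List String) : List String :=
  if _h : cs = [] then tiers
  else
    pvALoop cs.dropLast (if cs.dropLast = [] then tiers else tiers ++ [String.ofList cs.dropLast])
termination_by cs.length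
decreasing_by
  simp only [List.length_dropLast]
  have : cs.length ≠ 0 := by simpa [List.length_eq_zero_iff] using _h
  omega

def create_array_of_tiers (n : Int) : List String :=
  let num_string := PySem.Int.toStr n
  (pvALoop num_string.toList [num_string]).reverse

-- ===== PORT B =====
def create_array_of_tiers_alt (n : Int) : List String :=
  let s := PySem.Int.toStr n
  (PySem.List.pyRange 1 (PySem.Str.len s + 1) 1).map (fun i => PySem.Str.slice s none (some i))

-- ===== PRECONDITION & SPEC =====
def Spec_create_array_of_tiers (n : Int) (out : List String) : Prop := out = create_array_of_tiers_alt n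
instance (n : Int) (out : List String) : Decidable (Spec_create_array_of_tiers n out) := by unfold Spec_create_array_of_tiers; infer_instance

-- ===== CLAIM (what is proved, stated in full; the proofs are below) =====
def Claim_equal_create_array_of_tiers : Prop := ∀ (n : Int), Dom_create_array_of_tiers n → Spec_create_array_of_tiers n (create_array_of_tiers n)

-- ===== LEMMAS AND PROOFS =====

lemma pv_toDigitsCore_len (b : Nat) : ∀ (f n : Nat) (l : List Char),
    l.length ≤ (Nat.toDigitsCore b f n l).length := by
  intro f
  induction f with
  | zero => intro n l; simp [Nat.toDigitsCore]
  | succ f ih =>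
    intro n l
    simp only [Nat.toDigitsCore]
    split
    · simp
    · calc l.length ≤ (Nat.digitChar (n % b) :: l).length := by simp
        _ ≤ _ := ih _ _

lemma pv_toDigits_ne_nil (m : Nat) : Nat.toDigits 10 m ≠ [] := by
  unfold Nat.toDigits
  intro hc
  simp only [Nat.toDigitsCore] at hc
  revert hc
  split
  · simp
  · intro hc
    have := pv_toDigitsCore_len 10 m (m / 10) [Nat.digitChar (m % 10)]
    rw [hc] at this
    simp at this

lemma pv_toChars_ne_nil (n : Int) : PySem.Int.toChars n ≠ [] := by
  simp only [PySem.Int.toChars]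
  split
  · simp
  · exact pv_toDigits_ne_nil _

lemma pvALoop_eq : ∀ (N : Nat) (cs : List Char), cs.length ≤ N → ∀ (acc : List String),
    pvALoop cs acc
      = acc ++ ((List.range' 1 (cs.length - 1)).reverse.map fun k => String.ofList (cs.take k)) := by
  intro N
  induction N with
  | zero =>
    intro cs h acc
    have : cs = [] := by simpa [List.length_eq_zero_iff] using Nat.le_zero.mp h
    subst this
    rw [pvALoop]
    simp
  | succ N ih =>
    intro cs h acc
    by_cases hnil : cs = []
    · subst hnil; rw [pvALoop]; simp
    · rw [pvALoop]
      simp only [hnil, dite_false]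
      by_cases hd : cs.dropLast = []
      · have h1 : cs.length = 1 := by
          have ha := List.length_dropLast (xs := cs)
          rw [hd] at ha
          have hb : cs.length ≠ 0 := by simpa [List.length_eq_zero_iff] using hnil
          simp only [List.length_nil] at ha
          omega
        rw [if_pos hd, hd, pvALoop]
        simp [h1]
      · have hm : 1 ≤ cs.length - 1 := by
          have h2 := List.length_dropLast (xs := cs)
          have : cs.dropLast.length ≠ 0 := fun h0 => hd (List.length_eq_zero_iff.mp h0)
          omega
        rw [if_neg hd]
        rw [ih cs.dropLast (by have hdl := List.length_dropLast (xs := cs); omega) (acc ++ [String.ofList cs.dropLast])]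
        have hsplit : List.range' 1 (cs.length - 1)
            = List.range' 1 (cs.length - 1 - 1) ++ [cs.length - 1] := by
          have := List.range'_concat (s := 1) (n := cs.length - 1 - 1) (step := 1)
          rw [show cs.length - 1 = cs.length - 1 - 1 + 1 by omega, this]
          congr 1
          simp; omega
        rw [hsplit]
        have hdl : cs.dropLast = cs.take (cs.length - 1) := List.dropLast_eq_take (l := cs)
        have hmaps : (List.range' 1 (cs.length - 1 - 1)).reverse.map
              (fun k => String.ofList (cs.dropLast.take k))
            = (List.range' 1 (cs.length - 1 - 1)).reverse.map
              (fun k => String.ofList (cs.take k)) := by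
          apply List.map_congr_left
          intro k hk
          rw [List.mem_reverse, List.mem_range'_1] at hk
          rw [hdl, List.take_take]
          congr 2
          omega
        rw [show cs.dropLast.length = cs.length - 1 from List.length_dropLast (xs := cs), hmaps]
        simp [hdl, List.append_assoc]

lemma pv_pyRange (L : Nat) :
    PySem.List.pyRange 1 ((L : Int) + 1) 1 = List.map (fun k : Nat => (k : Int)) (List.range' 1 L) := by
  induction L with
  | zero => simp [PySem.List.pyRange]
  | succ L ih =>
    have hc : ((L + 1 : Nat) : Int) + 1 = ((L : Int) + 1) + 1 := by push_cast; ring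
    rw [hc, PySem.List.pyRange_one_succ_right (by omega), ih,
        List.range'_concat (s := 1) (n := L) (step := 1)]
    simp
    omega

lemma pv_slice_take (s : String) (k : Nat) :
    PySem.Str.slice s none (some (k : Int)) = String.ofList (s.toList.take k) := by
  simp [PySem.Str.slice, PySem.List.slice_to_natCast]

-- ===== VERDICT (by name: the statement is the Claim_ definition above) =====
theorem create_array_of_tiers_spec : Claim_equal_create_array_of_tiers := by
  intro n _
  unfold Spec_create_array_of_tiers create_array_of_tiers create_array_of_tiers_alt
  show (pvALoop (PySem.Int.toStr n).toList [PySem.Int.toStr n]).reverse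
      = (PySem.List.pyRange 1 (PySem.Str.len (PySem.Int.toStr n) + 1) 1).map
          (fun i => PySem.Str.slice (PySem.Int.toStr n) none (some i))
  set s := PySem.Int.toStr n with hs
  set cs := s.toList with hcs
  have hL : 1 ≤ cs.length := by
    have h1 : cs = PySem.Int.toChars n := by rw [hcs, hs, PySem.Int.toList_toStr]
    have h2 := pv_toChars_ne_nil n
    rw [← h1] at h2
    have : cs.length ≠ 0 := by simpa [List.length_eq_zero_iff] using h2
    omega
  rw [pvALoop_eq cs.length cs le_rfl [s]]
  rw [PySem.Str.len_eq, ← hcs, pv_pyRange cs.length]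
  have hB : List.map (fun i => PySem.Str.slice s none (some i))
        (List.map (fun k : Nat => (k : Int)) (List.range' 1 cs.length))
      = (List.range' 1 cs.length).map (fun k => String.ofList (cs.take k)) := by
    rw [List.map_map]
    apply List.map_congr_left
    intro k _
    simp only [Function.comp_apply]
    rw [pv_slice_take, hcs]
  rw [hB]
  have hsplit : List.range' 1 cs.length
      = List.range' 1 (cs.length - 1) ++ [cs.length] := by
    have := List.range'_concat (s := 1) (n := cs.length - 1) (step := 1)
    rw [show cs.length = cs.length - 1 + 1 by omega, this]
    congr 1
    simp; omega
  rw [hsplit]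
  have hlast : String.ofList cs = s := by
    rw [hcs, String.ofList_toList]
  simp [hlast]
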